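-- pv_equiv track=rewrite | github.com/meows4h/mypy | mypyc/namegen.py | make_module_translation_map
-- ===== SOURCE A (Python) =====
-- def make_module_translation_map(names: list[str]) -> dict[str, str]:
--     num_instances: dict[str, int] = {}
--     for name in names:
--         for suffix in candidate_suffixes(name):
--             num_instances[suffix] = num_instances.get(suffix, 0) + 1
--     result = {}
--     for name in names:
--         for suffix in candidate_suffixes(name):
--             if num_instances[suffix] == 1:
--                 break
--         # Takes the last suffix if none are unique
--         result[name] = suffix
--     return result
--
-- def candidate_suffixes(fullname: str) -> list[str]:
--     components = fullname.split(".")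
--     result = [""]
--     for i in range(len(components)):
--         result.append(".".join(components[-i - 1 :]) + ".")
--     return result
-- ===== SOURCE B (Python) =====
-- def make_module_translation_map(names: list[str]) -> dict[str, str]:
--     # Reverse-component trie: node = [count, children]; count = how many (name, suffix) pairs reach this node.
--     root = [0, {}]
--     for name in names:
--         node = root
--         node[0] += 1
--         for comp in reversed(name.split(".")):
--             node = node[1].setdefault(comp, [0, {}])
--             node[0] += 1
--     result = {}
--     for name in names:
--         comps = name.split(".")
--         node = root
--         depth = 0
--         while node[0] != 1 and depth < len(comps):
--             node = node[1][comps[-1 - depth]]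
--             depth += 1
--         result[name] = ".".join(comps[len(comps) - depth:]) + "." if depth else ""
--     return result
-- ===== Notes on version B (the rewrite author's own statement) =====
-- stated objective: faster
-- what changed: Replaces A's flat dict counting every generated suffix string of every name (and regenerating all suffix strings again to pick the first unique one) by a trie keyed on reversed dotted components with per-node integer counts, built in one pass and descended once per name; the chosen suffix string is built only once per name.
import Mathlib
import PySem

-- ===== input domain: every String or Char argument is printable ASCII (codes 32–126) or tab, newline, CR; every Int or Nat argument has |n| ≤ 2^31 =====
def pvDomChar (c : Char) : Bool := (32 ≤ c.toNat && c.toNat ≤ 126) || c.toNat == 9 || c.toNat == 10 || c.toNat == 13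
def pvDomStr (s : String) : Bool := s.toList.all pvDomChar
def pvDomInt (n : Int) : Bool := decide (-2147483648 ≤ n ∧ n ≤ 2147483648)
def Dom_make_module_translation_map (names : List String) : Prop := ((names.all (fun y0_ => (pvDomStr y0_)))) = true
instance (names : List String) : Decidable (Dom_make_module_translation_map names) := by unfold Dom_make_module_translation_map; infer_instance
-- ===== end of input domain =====

-- B replaces A's flat dict of all generated suffix strings by a reversed-component trie with
-- per-node counts and a single descent per name (measured faster in a timing run; exact same result).


-- ===== PORT A =====
-- shared helper: name.split(".") — the separator "." is nonempty, so Python's split never raises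
def pySplitDot (s : String) : List String :=
  (PySem.Chars.splitOn s.toList ['.']).map String.ofList

def candidate_suffixes (fullname : String) : List String :=
  let components := pySplitDot fullname
  (PySem.List.pyRange 0 (components.length : Int) 1).foldl
    (fun result i => result ++ [PySem.Str.join "." (PySem.List.slice components (some (-i - 1)) none) ++ "."])
    [""]

-- the inner 'for suffix in …: if num_instances[suffix] == 1: break' of A, with the value of
-- 'suffix' after the loop as result; candidate_suffixes is never [], and on the last candidate
-- Python's check does not change the resulting suffix, so '| [s] => s' is exact; every candidate
-- was counted in the first loop, so the key is present and getD 0 is exact for num_instances[suffix].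
def pvPick (num : PySem.Dict String Int) : List String → String
  | [] => ""
  | [s] => s
  | s :: rest => if num.getD s 0 == 1 then s else pvPick num rest

def make_module_translation_map (names : List String) : List (String × String) :=
  let num_instances : PySem.Dict String Int :=
    names.foldl (fun d name =>
      (candidate_suffixes name).foldl (fun d suffix => d.insert suffix (d.getD suffix 0 + 1)) d) .empty
  let result : PySem.Dict String String :=
    names.foldl (fun r name => r.insert name (pvPick num_instances (candidate_suffixes name))) .empty
  result.items

-- ===== PORT B =====
-- trie node [count, children] of Source B (children as an association structure; mutual pair, no nested inductive)
mutual
inductive PvTrie : Type where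
  | mk : Int → PvKids → PvTrie
inductive PvKids : Type where
  | nil : PvKids
  | cons : String → PvTrie → PvKids → PvKids
end

def pvKidsGet? : PvKids → String → Option PvTrie
  | .nil, _ => none
  | .cons k t rest, x => if k == x then some t else pvKidsGet? rest x

def pvKidsSet : PvKids → String → PvTrie → PvKids
  | .nil, x, t => .cons x t .nil
  | .cons k u rest, x, t => if k == x then .cons k t rest else .cons k u (pvKidsSet rest x t)

-- Source B's node[1][comp]; the default is never read on reachable states (the child of a name that
-- was inserted is always present), where Python would raise KeyError
def pvChild (k : PvKids) (x : String) : PvTrie :=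
  (pvKidsGet? k x).getD (.mk 0 .nil)

-- the insertion loop of Source B: increment the count, setdefault the child, recurse
def pvTrieAdd : PvTrie → List String → PvTrie
  | .mk c k, [] => .mk (c + 1) k
  | .mk c k, x :: xs => .mk (c + 1) (pvKidsSet k x (pvTrieAdd (pvChild k x) xs))

-- the while loop of Source B over the reversed components
def pvDescend : PvTrie → List String → Nat → Nat
  | .mk _ _, [], depth => depth
  | .mk c k, x :: rest, depth => if c == 1 then depth else pvDescend (pvChild k x) rest (depth + 1)

def make_module_translation_map_alt (names : List String) : List (String × String) :=
  let root : PvTrie := names.foldl (fun t name => pvTrieAdd t (pySplitDot name).reverse) (.mk 0 .nil)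
  let result : PySem.Dict String String :=
    names.foldl (fun r name =>
      let comps := pySplitDot name
      let depth := pvDescend root comps.reverse 0
      r.insert name
        (if depth ≠ 0 then PySem.Str.join "." (comps.drop (comps.length - depth)) ++ "." else "")) .empty
  result.items

-- ===== PRECONDITION & SPEC =====
def Spec_make_module_translation_map (names : List String) (out : List (String × String)) : Prop := out = make_module_translation_map_alt names
instance (names : List String) (out : List (String × String)) : Decidable (Spec_make_module_translation_map names out) := by unfold Spec_make_module_translation_map; infer_instance

-- ===== CLAIM (what is proved, stated in full; the proofs are below) =====
def Claim_equal_make_module_translation_map : Prop := ∀ (names : List String), Dom_make_module_translation_map names → Spec_make_module_translation_map names (make_module_translation_map names)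

-- ===== LEMMAS AND PROOFS =====

-- the suffix string at depth d ≥ 1 of a component list C: ".".join(C[len(C)-d:]) + "."
def pvSuf (C : List String) (d : Nat) : String :=
  PySem.Str.join "." (C.drop (C.length - d)) ++ "."

-- the candidate suffix at depth d (d = 0 is the empty suffix)
def pvKey (C : List String) (d : Nat) : String :=
  if d = 0 then "" else pvSuf C d

-- first depth ≥ d with g = 1 among the next r depths, else d + r
def pvFirstD (g : Nat → Int) : Nat → Nat → Nat
  | d, 0 => d
  | d, r + 1 => if g d = 1 then d else pvFirstD g (d + 1) r

-- count stored at the node reached by path p (0 if the node does not exist)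
def pvTrieCnt : PvTrie → List String → Int
  | .mk c _, [] => c
  | .mk _ k, x :: p => pvTrieCnt (pvChild k x) p

-- every piece of s.split(".") is dot-free
theorem pvGoDotFree : ∀ (fuel : Nat) (l cur : List Char) (acc : List (List Char)),
    l.length < fuel → (∀ p ∈ acc, '.' ∉ p) → '.' ∉ cur →
    ∀ p ∈ PySem.Chars.splitOn.go ['.'] fuel l cur acc, '.' ∉ p := by
  intro fuel
  induction fuel with
  | zero => intro l cur acc h; omega
  | succ fuel ih =>
    intro l cur acc hlen hacc hcur p hp
    cases l with
    | nil =>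
      rw [PySem.Chars.splitOn.go] at hp
      simp only [List.mem_reverse, List.mem_cons] at hp
      rcases hp with h | h
      · subst h; simpa using hcur
      · exact hacc p h
      · omega
    | cons c rest =>
      rw [PySem.Chars.splitOn.go] at hp
      by_cases hpre : ['.'].isPrefixOf (c :: rest) = true
      · simp only [hpre, if_true] at hp
        refine ih _ [] _ (by simp at hlen ⊢; omega) ?_ (by simp) p hp
        intro q hq
        simp only [List.mem_cons] at hq
        rcases hq with h | h
        · subst h; simpa using hcur
        · exact hacc q h
      · simp only [hpre] at hp
        have hc : c ≠ '.' := by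
          intro h; subst h; simp [List.isPrefixOf] at hpre
        refine ih rest (c :: cur) acc (by simp at hlen; omega) hacc ?_ p hp
        simp only [List.mem_cons, not_or]
        exact ⟨fun h => hc h.symm, hcur⟩

theorem pySplitDot_dotFree (s : String) : ∀ p ∈ pySplitDot s, '.' ∉ p.toList := by
  intro p hp
  simp only [pySplitDot, List.mem_map] at hp
  obtain ⟨q, hq, rfl⟩ := hp
  rw [String.toList_ofList]
  exact pvGoDotFree (s.toList.length + 1) s.toList [] [] (by omega) (by simp) (by simp) q hq

-- components[-i-1:] is drop (len - (i+1))
theorem pvSliceNeg {α : Type} (C : List α) (m : Nat) :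
    PySem.List.slice C (some (-(m : Int) - 1)) none = C.drop (C.length - (m + 1)) := by
  simp only [PySem.List.slice, PySem.List.clampIdx]
  by_cases h : (C.length : Int) + (-(m : Int) - 1) < 0
  · rw [if_pos (by omega), if_pos h]
    have h2 : C.length - (m + 1) = 0 := by omega
    simp [h2]
  · rw [if_pos (by omega), if_neg h]
    have h2 : ((C.length : Int) + (-(m : Int) - 1)).toNat = C.length - (m + 1) := by omega
    rw [h2]
    apply List.take_of_length_le
    rw [List.length_drop]

theorem candidate_suffixes_eq (n : String) :
    candidate_suffixes n =
      "" :: (List.range (pySplitDot n).length).map (fun i => pvSuf (pySplitDot n) (i + 1)) := by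
  simp only [candidate_suffixes, PySem.List.pyRange_zero_natCast, List.foldl_map,
    PySem.List.foldl_append_singleton_eq_map]
  simp only [pvSuf, pvSliceNeg]
  rfl

theorem pvSuf_toList (C : List String) (d : Nat) :
    (pvSuf C d).toList = ['.'].intercalate ((C.drop (C.length - d)).map String.toList) ++ ['.'] := by
  simp [pvSuf, PySem.Str.join, PySem.Chars.join, String.toList_append, String.toList_ofList]

theorem pvSuf_ne_empty (C : List String) (d : Nat) : pvSuf C d ≠ "" := by
  intro h
  have := congrArg String.toList h
  rw [pvSuf_toList] at this
  simp at this

-- two suffix strings are equal only when the chosen component suffixes are equal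
theorem pvSuf_inj {C1 C2 : List String} {d1 d2 : Nat}
    (h1 : ∀ p ∈ C1, '.' ∉ p.toList) (h2 : ∀ p ∈ C2, '.' ∉ p.toList)
    (hd1 : 1 ≤ d1) (hl1 : d1 ≤ C1.length) (hd2 : 1 ≤ d2) (hl2 : d2 ≤ C2.length)
    (h : pvSuf C1 d1 = pvSuf C2 d2) :
    C1.drop (C1.length - d1) = C2.drop (C2.length - d2) := by
  have ht := congrArg String.toList h
  rw [pvSuf_toList, pvSuf_toList] at ht
  have hi : ['.'].intercalate ((C1.drop (C1.length - d1)).map String.toList)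
      = ['.'].intercalate ((C2.drop (C2.length - d2)).map String.toList) :=
    List.append_cancel_right ht
  have hdf1 : ∀ l ∈ (C1.drop (C1.length - d1)).map String.toList, '.' ∉ l := by
    intro l hl
    simp only [List.mem_map] at hl
    obtain ⟨q, hq, rfl⟩ := hl
    exact h1 q (List.mem_of_mem_drop hq)
  have hdf2 : ∀ l ∈ (C2.drop (C2.length - d2)).map String.toList, '.' ∉ l := by
    intro l hl
    simp only [List.mem_map] at hl
    obtain ⟨q, hq, rfl⟩ := hl
    exact h2 q (List.mem_of_mem_drop hq)
  have hne1 : (C1.drop (C1.length - d1)).map String.toList ≠ [] := by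
    intro h
    have := congrArg List.length h
    simp only [List.length_map, List.length_drop, List.length_nil] at this
    omega
  have hne2 : (C2.drop (C2.length - d2)).map String.toList ≠ [] := by
    intro h
    have := congrArg List.length h
    simp only [List.length_map, List.length_drop, List.length_nil] at this
    omega
  have e1 := List.splitOn_intercalate ((C1.drop (C1.length - d1)).map String.toList) '.' hdf1 hne1
  have e2 := List.splitOn_intercalate ((C2.drop (C2.length - d2)).map String.toList) '.' hdf2 hne2
  have hm : (C1.drop (C1.length - d1)).map String.toList = (C2.drop (C2.length - d2)).map String.toList := by
    rw [← e1, hi, e2]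
  exact List.map_injective_iff.mpr (fun a b => String.toList_inj.mp) hm

theorem pvDropLen (C : List String) (d : Nat) (h : d ≤ C.length) :
    (C.drop (C.length - d)).length = d := by
  rw [List.length_drop]; omega

theorem pvPrefixIff (Cn Cm : List String) (d : Nat) (hm : d ≤ Cm.length) :
    (Cm.reverse.take d).IsPrefix Cn.reverse ↔
      d ≤ Cn.length ∧ Cn.drop (Cn.length - d) = Cm.drop (Cm.length - d) := by
  constructor
  · intro h
    have hlen : (Cm.reverse.take d).length = d := by
      rw [List.length_take, List.length_reverse]; omega
    have hle : d ≤ Cn.length := by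
      have := h.length_le
      rw [hlen, List.length_reverse] at this
      omega
    refine ⟨hle, ?_⟩
    have := List.prefix_iff_eq_take.mp h
    rw [hlen] at this
    rw [List.take_reverse, List.take_reverse] at this
    exact List.reverse_injective this.symm
  · rintro ⟨hle, hdrop⟩
    have : Cm.reverse.take d = Cn.reverse.take d := by
      rw [List.take_reverse, List.take_reverse, hdrop]
    rw [this]
    exact List.take_prefix d Cn.reverse

-- how often the depth-d candidate of nm occurs among the candidates of n
theorem pvCount_sfx (n nm : String) (d : Nat) (hd : d ≤ (pySplitDot nm).length) :
    (candidate_suffixes n).count (pvKey (pySplitDot nm) d) =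
      (if ((pySplitDot nm).reverse.take d).IsPrefix (pySplitDot n).reverse then 1 else 0) := by
  rw [candidate_suffixes_eq]
  rcases Nat.eq_zero_or_pos d with hd0 | hd1
  · subst hd0
    rw [if_pos (by simp)]
    simp only [pvKey, if_pos rfl]
    rw [List.count_cons, List.count_eq_zero_of_not_mem ?_]
    · simp
    intro hmem
    simp only [List.mem_map] at hmem
    obtain ⟨i, _, hi⟩ := hmem
    exact pvSuf_ne_empty (pySplitDot n) (i + 1) hi
  · have hkey : pvKey (pySplitDot nm) d = pvSuf (pySplitDot nm) d := by
      simp [pvKey]; omega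
    rw [hkey, List.count_cons, if_neg (fun h => pvSuf_ne_empty _ _ (by simpa using h.symm)), Nat.add_zero]
    rw [List.count_eq_countP, List.countP_map]
    simp only [pvPrefixIff _ _ _ hd]
    by_cases hcond : d ≤ (pySplitDot n).length ∧
        (pySplitDot n).drop ((pySplitDot n).length - d) = (pySplitDot nm).drop ((pySplitDot nm).length - d)
    · rw [if_pos hcond]
      obtain ⟨hle, hdrop⟩ := hcond
      have : List.countP ((fun x => x == pvSuf (pySplitDot nm) d) ∘ fun i => pvSuf (pySplitDot n) (i + 1))
          (List.range (pySplitDot n).length) = List.countP (fun i => i == d - 1) (List.range (pySplitDot n).length) := by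
        apply List.countP_congr
        intro i hi
        simp only [List.mem_range] at hi
        simp only [Function.comp, beq_iff_eq]
        constructor
        · intro h
          have := pvSuf_inj (pySplitDot_dotFree n) (pySplitDot_dotFree nm)
            (by omega) (by omega) (by omega) hd h
          have hlen := congrArg List.length this
          rw [pvDropLen _ _ (by omega), pvDropLen _ _ hd] at hlen
          omega
        · intro h
          have hi1 : i + 1 = d := by omega
          rw [hi1]
          unfold pvSuf
          rw [hdrop]
      rw [this, ← List.count_eq_countP, List.count_eq_one_of_mem (List.nodup_range) (by simp only [List.mem_range]; omega)]
    · rw [if_neg hcond]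
      rw [List.countP_eq_zero]
      intro i hi
      simp only [List.mem_range] at hi
      simp only [Function.comp, beq_iff_eq]
      intro h
      have := pvSuf_inj (pySplitDot_dotFree n) (pySplitDot_dotFree nm)
        (by omega) (by omega) (by omega) hd h
      have hlen := congrArg List.length this
      rw [pvDropLen _ _ (by omega), pvDropLen _ _ hd] at hlen
      exact hcond ⟨by omega, by rw [← this]; congr 1; omega⟩

-- A's num_instances is the multiset count over all candidate suffixes of all names
theorem pvAcnt_getD (names : List String) (s : String) :
    (names.foldl (fun d name =>
      (candidate_suffixes name).foldl (fun d suffix => d.insert suffix (d.getD suffix 0 + 1)) d)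
      PySem.Dict.empty).getD s 0 =
    ((names.flatMap candidate_suffixes).count s : Int) := by
  rw [← List.foldl_flatMap, PySem.Dict.getD_foldl_insert_add_one, PySem.Dict.getD_empty]
  simp

theorem pvSumIte (l : List String) (p : String → Prop) [DecidablePred p] :
    (l.map (fun x => if p x then 1 else 0)).sum = l.countP (fun x => decide (p x)) := by
  induction l with
  | nil => rfl
  | cons x l ih => by_cases h : p x <;> simp [h, ih] <;> omega

theorem pvTrieCnt_empty (p : List String) : pvTrieCnt (.mk 0 .nil) p = 0 := by
  induction p with
  | nil => rfl
  | cons x p ih => simpa [pvTrieCnt, pvChild, pvKidsGet?] using ih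

theorem pvKidsGet?_set_self : ∀ (k : PvKids) (x : String) (t : PvTrie), pvKidsGet? (pvKidsSet k x t) x = some t
  | .nil, x, t => by simp [pvKidsSet, pvKidsGet?]
  | .cons a u rest, x, t => by
    by_cases h : a == x
    · simp [pvKidsSet, pvKidsGet?, h]
    · simp [pvKidsSet, pvKidsGet?, h, pvKidsGet?_set_self rest x t]

theorem pvKidsGet?_set_ne : ∀ (k : PvKids) (x y : String) (t : PvTrie), y ≠ x → pvKidsGet? (pvKidsSet k x t) y = pvKidsGet? k y
  | .nil, x, y, t, h => by simp [pvKidsSet, pvKidsGet?, Ne.symm h]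
  | .cons a u rest, x, y, t, h => by
    by_cases h2 : a == x
    · have : a = x := by simpa using h2
      subst this
      simp [pvKidsSet, pvKidsGet?, Ne.symm h]
    · simp [pvKidsSet, pvKidsGet?, h2, pvKidsGet?_set_ne rest x y t h]

-- inserting path q raises by one exactly the counts of the nodes on q (prefixes of q)
theorem pvTrieCnt_add : ∀ (p q : List String) (t : PvTrie),
    pvTrieCnt (pvTrieAdd t q) p = pvTrieCnt t p + (if p.IsPrefix q then 1 else 0) := by
  intro p
  induction p with
  | nil => intro q t; obtain ⟨c, k⟩ := t; cases q <;> simp [pvTrieAdd, pvTrieCnt]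
  | cons x p ih =>
    intro q t; obtain ⟨c, k⟩ := t
    cases q with
    | nil => simp [pvTrieAdd, pvTrieCnt]
    | cons y q =>
      by_cases hxy : x = y
      · subst hxy
        simp only [pvTrieAdd, pvTrieCnt, pvChild, pvKidsGet?_set_self, Option.getD_some]
        rw [show ((pvKidsGet? k x).getD (PvTrie.mk 0 PvKids.nil)) = pvChild k x from rfl, ih q (pvChild k x)]
        simp [List.cons_prefix_cons]
      · simp only [pvTrieAdd, pvTrieCnt, pvChild, pvKidsGet?_set_ne k y x _ hxy]
        simp [List.cons_prefix_cons, hxy]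

theorem pvTrieCnt_root (names : List String) (t0 : PvTrie) (p : List String) :
    pvTrieCnt (names.foldl (fun t name => pvTrieAdd t (pySplitDot name).reverse) t0) p =
      pvTrieCnt t0 p + (names.countP (fun n => decide (p.IsPrefix (pySplitDot n).reverse)) : Int) := by
  induction names generalizing t0 with
  | nil => simp
  | cons n names ih =>
    rw [List.foldl_cons, ih, pvTrieCnt_add, List.countP_cons]
    by_cases h : p.IsPrefix (pySplitDot n).reverse <;> simp [h] <;> omega

-- the central bridge: A's count of the depth-d candidate of nm = B's trie count on nm's path
theorem pvBridge (names : List String) (nm : String) (d : Nat) (hd : d ≤ (pySplitDot nm).length) :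
    (names.foldl (fun dd name =>
      (candidate_suffixes name).foldl (fun dd suffix => dd.insert suffix (dd.getD suffix 0 + 1)) dd)
      PySem.Dict.empty).getD (pvKey (pySplitDot nm) d) 0 =
    pvTrieCnt (names.foldl (fun t name => pvTrieAdd t (pySplitDot name).reverse) (.mk 0 .nil))
      ((pySplitDot nm).reverse.take d) := by
  rw [pvAcnt_getD, pvTrieCnt_root, pvTrieCnt_empty, List.count_flatMap]
  rw [List.map_congr_left (fun n _ => by
    rw [Function.comp_apply, pvCount_sfx n nm d hd])]
  rw [pvSumIte names (fun n => ((pySplitDot nm).reverse.take d).IsPrefix (pySplitDot n).reverse)]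
  omega

theorem pvFirstD_ge (g : Nat → Int) : ∀ (d r : Nat), d ≤ pvFirstD g d r
  | d, 0 => le_refl d
  | d, r + 1 => by
    simp only [pvFirstD]
    split
    · exact le_refl d
    · exact le_trans (Nat.le_succ d) (pvFirstD_ge g (d+1) r)

theorem pvFirstD_congr (g g' : Nat → Int) : ∀ (d r : Nat),
    (∀ j, d ≤ j → j ≤ d + r → g j = g' j) → pvFirstD g d r = pvFirstD g' d r
  | d, 0, h => rfl
  | d, r + 1, h => by
    simp only [pvFirstD, h d (le_refl d) (by omega)]
    split
    · rfl
    · exact pvFirstD_congr g g' (d+1) r (fun j h1 h2 => h j (by omega) (by omega))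

-- Source B's while loop finds the first depth whose node count is 1, capped at the full depth
theorem pvDescend_eq (g : Nat → Int) : ∀ (p : List String) (t : PvTrie) (d0 : Nat),
    (∀ j, j ≤ p.length → pvTrieCnt t (p.take j) = g (d0 + j)) →
    pvDescend t p d0 = pvFirstD g d0 p.length
  | [], t, d0, h => by obtain ⟨c, k⟩ := t; rfl
  | x :: p, t, d0, h => by
    obtain ⟨c, k⟩ := t
    have h0 : c = g d0 := by simpa [pvTrieCnt] using h 0 (Nat.zero_le _)
    simp only [pvDescend, List.length_cons, pvFirstD, ← h0]
    by_cases hc : c = 1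
    · simp [hc]
    · simp only [hc, beq_iff_eq, if_false]
      exact pvDescend_eq g p (pvChild k x) (d0 + 1)
        (fun j hj => by simpa [pvTrieCnt, Nat.add_assoc, Nat.add_comm 1 j] using h (j+1) (by simpa using hj))

-- A's inner suffix loop expressed through pvFirstD
theorem pvPick_range' (D : PySem.Dict String Int) (C : List String) :
    ∀ (r a : Nat), pvPick D ((List.range' (a + 1) (r + 1)).map (fun i => pvSuf C i)) =
      pvSuf C (pvFirstD (fun d => D.getD (pvKey C d) 0) (a + 1) r)
  | 0, a => by simp [pvPick, pvFirstD]
  | r + 1, a => by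
    rw [List.range'_succ]
    simp only [List.map_cons]
    have hne : (List.range' (a + 2) (r + 1)).map (fun i => pvSuf C i) ≠ [] := by simp
    rw [show (a + 1 + 1) = a + 2 from rfl]
    obtain ⟨x, rest, hx⟩ := List.exists_cons_of_ne_nil hne
    rw [hx, show pvPick D (pvSuf C (a+1) :: x :: rest) =
        (if D.getD (pvSuf C (a+1)) 0 == 1 then pvSuf C (a+1) else pvPick D (x :: rest)) from rfl, ← hx]
    have hkey : pvKey C (a + 1) = pvSuf C (a + 1) := by simp [pvKey]
    simp only [pvFirstD, hkey, beq_iff_eq]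
    split
    · rfl
    · exact pvPick_range' D C r (a + 1)

theorem pvPick_eq (D : PySem.Dict String Int) (C : List String) (L : Nat) :
    pvPick D ("" :: (List.range L).map (fun i => pvSuf C (i + 1))) =
      (if pvFirstD (fun d => D.getD (pvKey C d) 0) 0 L = 0 then ""
       else pvSuf C (pvFirstD (fun d => D.getD (pvKey C d) 0) 0 L)) := by
  cases L with
  | zero => simp [pvPick, pvFirstD]
  | succ r =>
    have hne : (List.range (r + 1)).map (fun i => pvSuf C (i + 1)) ≠ [] := by simp
    obtain ⟨x, rest, hx⟩ := List.exists_cons_of_ne_nil hne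
    rw [hx, show pvPick D ("" :: x :: rest) =
        (if D.getD "" 0 == 1 then "" else pvPick D (x :: rest)) from rfl, ← hx]
    simp only [pvFirstD, show (fun d => D.getD (pvKey C d) 0) 0 = D.getD "" 0 from rfl, beq_iff_eq]
    split
    · simp
    · have hmap : (List.range (r + 1)).map (fun i => pvSuf C (i + 1))
          = (List.range' 1 (r + 1)).map (fun i => pvSuf C i) := by
        rw [List.range'_eq_map_range, List.map_map]
        exact List.map_congr_left (fun i _ => by simp [Nat.add_comm])
      rw [hmap, pvPick_range' D C r 0]
      have := pvFirstD_ge (fun d => D.getD (pvKey C d) 0) 1 r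
      rw [if_neg (show ¬(pvFirstD (fun d => D.getD (pvKey C d) 0) 1 r = 0) by omega)]

-- per-name equality of the chosen suffix
theorem pvChoose_eq (names : List String) (nm : String) :
    pvPick (names.foldl (fun d name =>
        (candidate_suffixes name).foldl (fun d suffix => d.insert suffix (d.getD suffix 0 + 1)) d)
        (PySem.Dict.empty : PySem.Dict String Int))
      (candidate_suffixes nm) =
    (if pvDescend (names.foldl (fun t name => pvTrieAdd t (pySplitDot name).reverse) (.mk 0 .nil))
          (pySplitDot nm).reverse 0 ≠ 0
     then PySem.Str.join "." ((pySplitDot nm).drop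
            ((pySplitDot nm).length - pvDescend (names.foldl (fun t name => pvTrieAdd t (pySplitDot name).reverse) (.mk 0 .nil))
              (pySplitDot nm).reverse 0)) ++ "."
     else "") := by
  set D : PySem.Dict String Int := names.foldl (fun d name =>
      (candidate_suffixes name).foldl (fun d suffix => d.insert suffix (d.getD suffix 0 + 1)) d)
      PySem.Dict.empty with hD
  set R : PvTrie := names.foldl (fun t name => pvTrieAdd t (pySplitDot name).reverse) (.mk 0 .nil) with hR
  set C : List String := pySplitDot nm with hC
  rw [candidate_suffixes_eq nm, ← hC, pvPick_eq]
  rw [pvDescend_eq (fun j => pvTrieCnt R (C.reverse.take j)) C.reverse R 0 (fun j hj => by rw [Nat.zero_add])]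
  rw [List.length_reverse]
  rw [pvFirstD_congr (fun d => D.getD (pvKey C d) 0) (fun j => pvTrieCnt R (C.reverse.take j)) 0 C.length
      (fun j _ hj => by rw [hD, hR, hC]; exact pvBridge names nm j (by rw [← hC]; omega))]
  by_cases h0 : pvFirstD (fun j => pvTrieCnt R (C.reverse.take j)) 0 C.length = 0
  · rw [h0]
    simp
  · rw [if_neg h0, if_pos h0]
    rfl

-- ===== VERDICT (by name: the statement is the Claim_ definition above) =====
theorem make_module_translation_map_spec : Claim_equal_make_module_translation_map := by
  unfold Claim_equal_make_module_translation_map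
  intro names _
  unfold Spec_make_module_translation_map
  simp only [make_module_translation_map, make_module_translation_map_alt]
  congr 1
  apply PySem.List.foldl_congr_mem
  intro acc nm _
  congr 1
  exact pvChoose_eq names nm
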